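-- pv_equiv track=rewrite | github.com/idiap/nnsslm | common/utils.py | SrcNoiseMixFilter
-- ===== SOURCE A (Python) =====
-- def SrcNoiseMixFilter(gt):
--     nsrc = 0
--     nnoise = 0
--     for _, stype, _ in gt:
--         if stype == 1:
--             nsrc += 1
--         else:
--             nnoise += 1
--     return nsrc > 0 and nnoise > 0
-- ===== SOURCE B (Python) =====
-- def SrcNoiseMixFilter(gt):
--     # A mix exists iff some element classifies differently from the first one.
--     if not gt:
--         return False
--     first = (gt[0][1] == 1)
--     return any((stype == 1) != first for _, stype, _ in gt[1:])
-- ===== Notes on version B (the rewrite author's own statement) =====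
-- stated objective: simpler
-- what changed: Drops the counters entirely: B fixes the classification of the first element and short-circuits on the first later element whose classification differs, instead of counting both categories over the whole list.
import Mathlib
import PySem

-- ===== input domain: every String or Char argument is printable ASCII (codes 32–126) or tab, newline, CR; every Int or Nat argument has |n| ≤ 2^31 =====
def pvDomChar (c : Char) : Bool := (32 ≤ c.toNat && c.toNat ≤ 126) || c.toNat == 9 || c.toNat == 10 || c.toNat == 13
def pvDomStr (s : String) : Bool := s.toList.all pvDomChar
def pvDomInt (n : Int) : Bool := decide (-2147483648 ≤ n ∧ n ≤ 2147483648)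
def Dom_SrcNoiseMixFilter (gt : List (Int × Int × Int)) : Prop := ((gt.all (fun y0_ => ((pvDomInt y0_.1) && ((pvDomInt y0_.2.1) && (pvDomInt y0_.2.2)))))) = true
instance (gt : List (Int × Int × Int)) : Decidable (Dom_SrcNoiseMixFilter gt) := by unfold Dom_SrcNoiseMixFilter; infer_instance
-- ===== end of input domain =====

-- B drops A's two counters: it compares every later element's classification with the first element's and short-circuits; objective: simpler.

-- ===== PORT A =====
-- literal port: the loop keeps the pair (nsrc, nnoise) and increments one side per element
def SrcNoiseMixFilter (gt : List (Int × Int × Int)) : Bool :=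
  let p : Int × Int := gt.foldl
    (fun acc t => if t.2.1 == 1 then (acc.1 + 1, acc.2) else (acc.1, acc.2 + 1)) (0, 0)
  decide (p.1 > 0) && decide (p.2 > 0)

-- ===== PORT B =====
-- literal port of Source B: empty → false; otherwise any element of gt[1:] whose flag differs from the first's
def SrcNoiseMixFilter_alt (gt : List (Int × Int × Int)) : Bool :=
  match gt with
  | [] => false
  | hd :: tl =>
    let first : Bool := hd.2.1 == 1
    tl.any (fun t => (t.2.1 == 1) != first)

-- ===== PRECONDITION & SPEC =====
def Spec_SrcNoiseMixFilter (gt : List (Int × Int × Int)) (out : Bool) : Prop := out = SrcNoiseMixFilter_alt gt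
instance (gt : List (Int × Int × Int)) (out : Bool) : Decidable (Spec_SrcNoiseMixFilter gt out) := by unfold Spec_SrcNoiseMixFilter; infer_instance

-- ===== CLAIM (what is proved, stated in full; the proofs are below) =====
def Claim_equal_SrcNoiseMixFilter : Prop := ∀ (gt : List (Int × Int × Int)), Dom_SrcNoiseMixFilter gt → Spec_SrcNoiseMixFilter gt (SrcNoiseMixFilter gt)

-- ===== LEMMAS AND PROOFS =====

-- A's fold starting from (a, b) adds the number of flag-true / flag-false elements to a / b
theorem SrcNoiseMix_fold_count (gt : List (Int × Int × Int)) :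
    ∀ (a b : Int),
    gt.foldl (fun acc t => if t.2.1 == 1 then (acc.1 + 1, acc.2) else (acc.1, acc.2 + 1)) (a, b)
      = (a + (gt.countP (fun t => t.2.1 == 1) : Int),
         b + (gt.countP (fun t => !(t.2.1 == 1)) : Int)) := by
  induction gt with
  | nil => intro a b; simp
  | cons hd tl ih =>
    intro a b
    by_cases h : (hd.2.1 == 1) = true
    · rw [List.foldl_cons, if_pos h, ih, List.countP_cons, List.countP_cons]
      simp [h]; ring
    · rw [List.foldl_cons, if_neg h, ih, List.countP_cons, List.countP_cons]
      simp [h]; ring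

-- positivity of a countP is existence of a satisfying element
theorem countP_pos_iff_any (gt : List (Int × Int × Int)) (p : (Int × Int × Int) → Bool) :
    decide ((0 : Int) < (gt.countP p : Int)) = gt.any p := by
  rcases h : gt.any p with _ | _
  · simp only [List.any_eq_false] at h
    have : gt.countP p = 0 := List.countP_eq_zero.mpr h
    simp [this]
  · obtain ⟨x, hx, hpx⟩ := List.any_eq_true.mp h
    have : 0 < gt.countP p := List.countP_pos_iff.mpr ⟨x, hx, hpx⟩
    have h2 : (0:Int) < (gt.countP p : Int) := by exact_mod_cast this
    simp only [h2, decide_true]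

-- ===== VERDICT (by name: the statement is the Claim_ definition above) =====
theorem SrcNoiseMixFilter_spec : Claim_equal_SrcNoiseMixFilter := by
  intro gt _
  unfold Spec_SrcNoiseMixFilter SrcNoiseMixFilter SrcNoiseMixFilter_alt
  rw [SrcNoiseMix_fold_count]
  simp only [zero_add]
  rw [countP_pos_iff_any, countP_pos_iff_any]
  cases gt with
  | nil => simp
  | cons hd tl =>
    by_cases h : (hd.2.1 == 1) = true
    · simp [h, List.any_cons]
    · simp only [Bool.not_eq_true] at h
      simp [h, List.any_cons]
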